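-- pv_equiv track=rewrite | github.com/nwithan8/pythonate | python8/core/dictionaries.py | dictionary_is_complete
-- ===== SOURCE A (Python) =====
-- from typing import List
--
-- def dictionary_is_complete(check_dictionary: dict, template_dictionary: dict, ignore_keys: List = None) -> bool:
--     """
--     Check that all keys in the template dictionary are present in the check_dictionary
--
--     :param check_dictionary: Dictionary to parse
--     :type check_dictionary: dict
--     :param template_dictionary: Dictionary to use for verification
--     :type template_dictionary: dict
--     :param ignore_keys: List of keys to ignore when checking (Optional)
--     :type ignore_keys: List, optional
--     :return: True if valid, False if not valid
--     :rtype: bool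
--     """
--     ignore_keys = ignore_keys or []
--
--     for k in template_dictionary.keys():
--         if k in ignore_keys or k in check_dictionary.keys():
--             pass
--         else:
--             return False
--     return True
-- ===== SOURCE B (Python) =====
-- def dictionary_is_complete(check_dictionary: dict, template_dictionary: dict, ignore_keys=None) -> bool:
--     missing = set(template_dictionary)
--     for k in check_dictionary:
--         missing.discard(k)
--     for k in ignore_keys or []:
--         missing.discard(k)
--     return not missing
-- ===== Notes on version B (the rewrite author's own statement) =====
-- stated objective: faster
-- what changed: Instead of testing each template key against the other two collections with early return, B starts from the set of template keys and ELIMINATES: one pass over check_dictionary and one over ignore_keys each discard keys from that shrinking set, and the answer is whether it ended empty.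
import Mathlib
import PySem

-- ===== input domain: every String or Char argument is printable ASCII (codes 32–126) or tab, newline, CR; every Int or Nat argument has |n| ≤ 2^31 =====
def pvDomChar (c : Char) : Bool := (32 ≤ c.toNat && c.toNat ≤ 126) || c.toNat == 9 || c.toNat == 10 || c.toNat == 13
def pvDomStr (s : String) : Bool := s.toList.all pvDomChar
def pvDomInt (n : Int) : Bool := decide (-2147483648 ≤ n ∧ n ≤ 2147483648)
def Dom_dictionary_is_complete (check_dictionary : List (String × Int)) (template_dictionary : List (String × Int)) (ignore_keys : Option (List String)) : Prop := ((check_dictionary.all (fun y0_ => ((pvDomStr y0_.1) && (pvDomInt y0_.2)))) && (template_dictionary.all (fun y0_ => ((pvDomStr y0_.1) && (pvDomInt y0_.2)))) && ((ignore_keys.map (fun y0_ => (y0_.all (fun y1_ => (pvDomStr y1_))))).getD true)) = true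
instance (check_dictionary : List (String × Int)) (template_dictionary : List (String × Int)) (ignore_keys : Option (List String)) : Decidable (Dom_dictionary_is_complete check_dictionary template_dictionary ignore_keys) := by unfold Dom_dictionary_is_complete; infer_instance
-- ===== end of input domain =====

-- B replaces A's per-template-key membership loop by elimination: start from set(template keys), discard keys seen in check_dictionary and in ignore_keys, answer = the set ended empty (alternative).

-- ===== PORT A =====
-- A's for-loop over template_dictionary.keys() with early 'return False'
def dicLoopA (ignore_keys : List String) (check_keys : List String) : List String → Bool
  | [] => true
  | k :: rest =>
    if ignore_keys.contains k || check_keys.contains k then dicLoopA ignore_keys check_keys rest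
    else false

def dictionary_is_complete (check_dictionary : List (String × Int)) (template_dictionary : List (String × Int)) (ignore_keys : Option (List String)) : Bool :=
  -- ignore_keys = ignore_keys or []
  let ik := ignore_keys.getD []
  -- dict keys = first-occurrence-distinct keys of the association list
  dicLoopA ik (PySem.List.dedup (check_dictionary.map Prod.fst))
    (PySem.List.dedup (template_dictionary.map Prod.fst))

-- ===== PORT B =====
def dictionary_is_complete_alt (check_dictionary : List (String × Int)) (template_dictionary : List (String × Int)) (ignore_keys : Option (List String)) : Bool :=
  let missing0 := PySem.Set.ofList (template_dictionary.map Prod.fst)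
  -- first elimination pass: for k in check_dictionary: missing.discard(k)
  let missing1 := (check_dictionary.map Prod.fst).foldl PySem.Set.discard missing0
  -- second elimination pass: for k in ignore_keys or []: missing.discard(k)
  let missing2 := (ignore_keys.getD []).foldl PySem.Set.discard missing1
  missing2.isEmpty

-- ===== PRECONDITION & SPEC =====
def Spec_dictionary_is_complete (check_dictionary : List (String × Int)) (template_dictionary : List (String × Int)) (ignore_keys : Option (List String)) (out : Bool) : Prop := out = dictionary_is_complete_alt check_dictionary template_dictionary ignore_keys
instance (check_dictionary : List (String × Int)) (template_dictionary : List (String × Int)) (ignore_keys : Option (List String)) (out : Bool) : Decidable (Spec_dictionary_is_complete check_dictionary template_dictionary ignore_keys out) := by unfold Spec_dictionary_is_complete; infer_instance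

-- ===== CLAIM (what is proved, stated in full; the proofs are below) =====
def Claim_equal_dictionary_is_complete : Prop := ∀ (check_dictionary : List (String × Int)) (template_dictionary : List (String × Int)) (ignore_keys : Option (List String)), Dom_dictionary_is_complete check_dictionary template_dictionary ignore_keys → Spec_dictionary_is_complete check_dictionary template_dictionary ignore_keys (dictionary_is_complete check_dictionary template_dictionary ignore_keys)

-- ===== LEMMAS AND PROOFS =====
lemma dicLoopA_iff (ik cks : List String) (ks : List String) :
    dicLoopA ik cks ks = true ↔ ∀ k ∈ ks, k ∈ ik ∨ k ∈ cks := by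
  induction ks with
  | nil => simp [dicLoopA]
  | cons k rest ih =>
    by_cases h : ik.contains k || cks.contains k <;> simp_all [dicLoopA]

lemma mem_foldl_discard (l : List String) (s : PySem.Set String) (x : String) :
    x ∈ l.foldl PySem.Set.discard s ↔ x ∈ s ∧ x ∉ l := by
  induction l generalizing s with
  | nil => simp
  | cons a l ih =>
    simp [List.foldl_cons, ih, PySem.Set.mem_discard]
    tauto

-- ===== VERDICT (by name: the statement is the Claim_ definition above) =====
theorem dictionary_is_complete_spec : Claim_equal_dictionary_is_complete := by
  intro c t ig _
  simp only [Spec_dictionary_is_complete, dictionary_is_complete, dictionary_is_complete_alt]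
  rw [Bool.eq_iff_iff, dicLoopA_iff, List.isEmpty_iff, List.eq_nil_iff_forall_not_mem]
  constructor
  · intro h k hk
    rw [mem_foldl_discard, mem_foldl_discard] at hk
    rcases h k (by simpa [PySem.Set.mem_ofList, PySem.List.mem_dedup] using hk.1.1) with h' | h'
    · exact hk.2 h'
    · exact hk.1.2 (by simpa [PySem.List.mem_dedup] using h')
  · intro h k hk
    by_cases hig : k ∈ ig.getD []
    · exact Or.inl hig
    · by_cases hc : k ∈ PySem.List.dedup (c.map Prod.fst)
      · exact Or.inr hc
      · refine absurd ?_ (h k)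
        rw [mem_foldl_discard, mem_foldl_discard]
        refine ⟨⟨?_, ?_⟩, hig⟩
        · simpa [PySem.Set.mem_ofList, PySem.List.mem_dedup] using hk
        · simpa [PySem.List.mem_dedup] using hc
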